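-- pv_equiv track=rewrite | github.com/cirosantilli/project-euler-solvers | solvers/169.py | solve
-- ===== SOURCE A (Python) =====
-- def count_zeros(x: int) -> list[int]:
--     while x & 1:
--         x >>= 1
--
--     result = []
--     consecutive = 0
--     while x > 0:
--         if (x & 1) == 0:
--             consecutive += 1
--         else:
--             result.insert(0, consecutive)
--             consecutive = 0
--         x >>= 1
--
--     return result
--
-- def solve(x: int) -> int:
--     zeros = count_zeros(x)
--
--     result = 1
--     total = 1
--     for z in zeros:
--         result += z * total
--         total += result
--
--     return result
-- ===== SOURCE B (Python) =====
-- def solve(x: int) -> int: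
--     n = x + 1
--     a, b = 1, 0
--     while n > 0:
--         if n & 1:
--             b += a
--         else:
--             a += b
--         n >>= 1
--     return b
-- ===== Notes on version B (the rewrite author's own statement) =====
-- stated objective: simpler
-- what changed: Replaced the zero-run-list construction plus per-run DP with Dijkstra's two-accumulator fusc iteration over the bits of x+1.
-- outside the precondition, e.g. on solve(-2): A returns 1, B returns 0
import Mathlib
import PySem

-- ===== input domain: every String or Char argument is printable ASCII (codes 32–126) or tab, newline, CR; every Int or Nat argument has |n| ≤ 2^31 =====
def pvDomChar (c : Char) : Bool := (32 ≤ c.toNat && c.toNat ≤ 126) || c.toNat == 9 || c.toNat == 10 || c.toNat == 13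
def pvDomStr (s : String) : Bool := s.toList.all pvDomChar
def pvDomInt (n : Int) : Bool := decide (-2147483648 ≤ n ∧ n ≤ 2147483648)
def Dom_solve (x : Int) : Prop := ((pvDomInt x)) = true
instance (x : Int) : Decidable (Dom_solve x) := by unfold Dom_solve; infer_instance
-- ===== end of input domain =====

-- B replaces A's zero-run-list + per-run DP with Dijkstra's two-accumulator fusc
-- iteration over the bits of x+1 (same O(log x) cost; simpler, no list is built).


-- termination helper for the while-loops (Python: x >>= 1 while x > 0)
theorem pvShiftToNatLt (x : Int) (h : 0 < x) : (x >>> (1:Nat)).toNat < x.toNat := by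
  rw [Int.shiftRight_eq_div_pow]
  omega

-- ===== PORT A =====
-- first loop of count_zeros: "while x & 1: x >>= 1"; fueled to make it total
-- (for 0 ≤ x fuel x.toNat+1 suffices; on negative odd x Python diverges — outside Pre_)
def stripOnes : Nat → Int → Int
  | 0, x => x
  | fuel+1, x =>
      if PySem.Int.band x 1 ≠ 0 then stripOnes fuel (x >>> (1:Nat)) else x

-- second loop of count_zeros: "while x > 0: …"
def countZerosLoop (x consecutive : Int) (result : List Int) : List Int :=
  if h : x > 0 then
    if PySem.Int.band x 1 = 0 then
      countZerosLoop (x >>> (1:Nat)) (consecutive + 1) result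
    else
      countZerosLoop (x >>> (1:Nat)) 0 (consecutive :: result)  -- result.insert(0, consecutive)
  else result
termination_by x.toNat
decreasing_by all_goals exact pvShiftToNatLt x h

def countZeros (x : Int) : List Int :=
  countZerosLoop (stripOnes (x.toNat + 1) x) 0 []

def solve (x : Int) : Int :=
  ((countZeros x).foldl
    (fun (s : Int × Int) z =>
      let result := s.1 + z * s.2   -- result += z * total
      (result, s.2 + result))       -- total += result
    (1, 1)).1

-- ===== PORT B =====
def fuscLoop (n a b : Int) : Int :=
  if h : n > 0 then
    if PySem.Int.band n 1 ≠ 0 then fuscLoop (n >>> (1:Nat)) a (b + a)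
    else fuscLoop (n >>> (1:Nat)) (a + b) b
  else b
termination_by n.toNat
decreasing_by all_goals exact pvShiftToNatLt n h

def solve_alt (x : Int) : Int := fuscLoop (x + 1) 1 0

-- ===== PRECONDITION & SPEC =====
-- Natural domain of this Project Euler solver: nonnegative x. On negative odd x the
-- Python A diverges in count_zeros's first loop; on negative even x it returns a
-- degenerate 1 from an empty run list (B returns 0 there).
def Pre_solve (x : Int) : Prop := 0 ≤ x
instance (x : Int) : Decidable (Pre_solve x) := by unfold Pre_solve; infer_instance
def pvWitness_solve : Int := 20

def Spec_solve (x : Int) (out : Int) : Prop := out = solve_alt x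
instance (x : Int) (out : Int) : Decidable (Spec_solve x out) := by unfold Spec_solve; infer_instance

-- ===== CLAIM (what is proved, stated in full; the proofs are below) =====
def Claim_equal_solve : Prop := ∀ (x : Int), Dom_solve x → Pre_solve x → Spec_solve x (solve x)

-- ===== LEMMAS AND PROOFS =====

-- Stern's diatomic sequence (the hyperbinary count)
def fusc (n : Nat) : Nat :=
  if h1 : n ≤ 1 then n
  else if h2 : n % 2 = 0 then fusc (n / 2)
  else fusc (n / 2) + fusc (n / 2 + 1)
termination_by n
decreasing_by all_goals omega

theorem fusc_zero : fusc 0 = 0 := by simp [fusc]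
theorem fusc_one : fusc 1 = 1 := by simp [fusc]

theorem fusc_even (k : Nat) : fusc (2 * k) = fusc k := by
  rcases Nat.eq_zero_or_pos k with h | h
  · subst h; rfl
  · rw [fusc]
    have h1 : ¬ 2 * k ≤ 1 := by omega
    have h3 : 2 * k / 2 = k := by omega
    simp [h1, h3]

theorem fusc_odd (k : Nat) : fusc (2 * k + 1) = fusc k + fusc (k + 1) := by
  rcases Nat.eq_zero_or_pos k with h | h
  · subst h; simp [fusc_zero, fusc_one]
  · rw [fusc]
    have h1 : ¬ 2 * k + 1 ≤ 1 := by omega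
    have h3 : (2 * k + 1) / 2 = k := by omega
    simp [h1, h3]

theorem fusc_pow_mul (c k : Nat) : fusc (2 ^ c * k) = fusc k := by
  induction c with
  | zero => simp
  | succ c ih =>
      have : 2 ^ (c + 1) * k = 2 * (2 ^ c * k) := by ring
      rw [this, fusc_even, ih]

-- key identity: fusc (2^c·(2m+1) + 1) = fusc (m+1) + c · fusc (2m+1)
theorem fusc_key (c m : Nat) : fusc (2 ^ c * (2 * m + 1) + 1) = fusc (m + 1) + c * fusc (2 * m + 1) := by
  induction c with
  | zero =>
      have : 2 ^ 0 * (2 * m + 1) + 1 = 2 * (m + 1) := by ring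
      rw [this, fusc_even]; ring
  | succ c ih =>
      have : 2 ^ (c + 1) * (2 * m + 1) + 1 = 2 * (2 ^ c * (2 * m + 1)) + 1 := by ring
      rw [this, fusc_odd, fusc_pow_mul, ih]; ring

-- cast bridges for the two Python primitives used by both loops
theorem pvShiftCast (m : Nat) : ((m : Nat) : Int) >>> (1:Nat) = ((m / 2 : Nat) : Int) := by
  simp [Int.shiftRight_eq_div_pow]

theorem pvBandCast (m : Nat) : PySem.Int.band ((m : Nat) : Int) 1 = ((m % 2 : Nat) : Int) := by
  simp [PySem.Int.band_one]

-- ===== B side: Dijkstra loop invariant =====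
theorem fuscLoop_eq (m : Nat) : ∀ (a b : Int),
    fuscLoop (m : Int) a b = a * (fusc m : Int) + b * (fusc (m + 1) : Int) := by
  induction m using Nat.strong_induction_on with
  | _ m ih =>
    intro a b
    rw [fuscLoop]
    rcases Nat.eq_zero_or_pos m with h0 | h0
    · subst h0; simp [fusc_zero, fusc_one]
    · have hpos : ((m : Nat) : Int) > 0 := by exact_mod_cast h0
      rw [dif_pos hpos, pvBandCast, pvShiftCast]
      rcases Nat.even_or_odd m with he | ho
      · obtain ⟨j, hj⟩ := he
        have hm : m = 2 * j := by omega
        have h2 : m % 2 = 0 := by omega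
        have hq : m / 2 = j := by omega
        rw [h2, hq]
        rw [if_neg (by simp : ¬ (((0:Nat) : Int) ≠ 0)), ih j (by omega)]
        rw [hm, fusc_even, fusc_odd]
        push_cast; ring
      · obtain ⟨k, hk⟩ := ho
        have h2 : m % 2 = 1 := by omega
        have hq : m / 2 = k := by omega
        rw [h2, hq]
        rw [if_pos (by simp : (((1:Nat) : Int) ≠ 0)), ih k (by omega)]
        rw [hk, fusc_odd, show 2 * k + 1 + 1 = 2 * (k + 1) from rfl, fusc_even]
        push_cast; ring

-- ===== A side =====
-- stripping trailing 1-bits preserves fusc (·+1), and stays a Nat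
theorem stripOnes_eq (fuel : Nat) : ∀ (m : Nat), m < fuel →
    ∃ k : Nat, stripOnes fuel ((m : Nat) : Int) = (k : Int) ∧ fusc (k + 1) = fusc (m + 1) := by
  induction fuel with
  | zero => intro m h; omega
  | succ fuel ih =>
    intro m hm
    rw [stripOnes]
    rcases Nat.even_or_odd m with he | ho
    · obtain ⟨j, hj⟩ := he
      have h2 : m % 2 = 0 := by omega
      rw [pvBandCast, h2]
      rw [if_neg (by simp : ¬ (((0:Nat) : Int) ≠ 0))]
      exact ⟨m, rfl, rfl⟩
    · obtain ⟨k, hk⟩ := ho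
      have h2 : m % 2 = 1 := by omega
      rw [pvBandCast, h2]
      rw [if_pos (by simp : (((1:Nat) : Int) ≠ 0)), pvShiftCast]
      have hq : m / 2 = k := by omega
      rw [hq]
      obtain ⟨k', hk', hf⟩ := ih k (by omega)
      refine ⟨k', hk', ?_⟩
      rw [hf, hk, show 2 * k + 1 + 1 = 2 * (k + 1) from rfl, fusc_even]

-- the DP state reached from (1,1) over the run list generated from (m, c)
theorem countZerosLoop_fold (m : Nat) : ∀ (c : Nat) (res : List Int),
    (countZerosLoop ((m : Nat) : Int) ((c : Nat) : Int) res).foldl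
      (fun (s : Int × Int) z =>
        let result := s.1 + z * s.2
        (result, s.2 + result)) (1, 1)
    = res.foldl
        (fun (s : Int × Int) z =>
          let result := s.1 + z * s.2
          (result, s.2 + result))
        ((fusc (2 ^ c * m + 1) : Int), (fusc (2 ^ (c + 1) * m + 1) : Int)) := by
  induction m using Nat.strong_induction_on with
  | _ m ih =>
    intro c res
    rw [countZerosLoop]
    rcases Nat.eq_zero_or_pos m with h0 | h0
    · subst h0
      rw [dif_neg (by decide : ¬ (((0:Nat) : Int) > 0))]
      simp [fusc_one]
    · have hpos : ((m : Nat) : Int) > 0 := by exact_mod_cast h0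
      rw [dif_pos hpos, pvBandCast, pvShiftCast]
      rcases Nat.even_or_odd m with he | ho
      · obtain ⟨j, hj⟩ := he
        have h2 : m % 2 = 0 := by omega
        have hq : m / 2 = j := by omega
        rw [h2, hq]
        rw [if_pos (by simp : (((0:Nat) : Int) = 0))]
        have hc1 : ((c : Nat) : Int) + 1 = (((c + 1 : Nat)) : Int) := by push_cast; ring
        have hm2 : m = 2 * j := by omega
        rw [hc1, ih j (by omega) (c + 1) res, hm2]
        rw [show 2 ^ c * (2 * j) = 2 ^ (c + 1) * j from by ring,
            show 2 ^ (c + 1) * (2 * j) = 2 ^ (c + 1 + 1) * j from by ring]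
      · obtain ⟨k, hk⟩ := ho
        have h2 : m % 2 = 1 := by omega
        have hq : m / 2 = k := by omega
        rw [h2, hq]
        rw [if_neg (by simp : ¬ (((1:Nat) : Int) = 0))]
        have h00 : (0 : Int) = (((0:Nat)) : Int) := rfl
        rw [h00, ih k (by omega) 0 (((c : Nat) : Int) :: res)]
        simp only [List.foldl_cons]
        congr 1
        show ((fusc (2^0*k+1) : Int) + ((c:Nat):Int) * (fusc (2^(0+1)*k+1) : Int),
              (fusc (2^(0+1)*k+1) : Int) + ((fusc (2^0*k+1) : Int) + ((c:Nat):Int) * (fusc (2^(0+1)*k+1) : Int)))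
            = ((fusc (2 ^ c * m + 1) : Int), (fusc (2 ^ (c + 1) * m + 1) : Int))
        have hA : 2 ^ 0 * k + 1 = k + 1 := by norm_num
        have hB : 2 ^ (0+1) * k + 1 = 2 * k + 1 := by norm_num
        rw [hA, hB, hk]
        rw [fusc_key c k, fusc_key (c + 1) k]
        simp only [Prod.mk.injEq]
        constructor
        · push_cast; ring
        · push_cast; ring

-- ===== VERDICT (by name: the statement is the Claim_ definition above) =====
theorem solve_spec : Claim_equal_solve := by
  intro x _ hpre
  unfold Spec_solve
  obtain ⟨m, rfl⟩ : ∃ m : Nat, x = (m : Int) := ⟨x.toNat, (Int.toNat_of_nonneg hpre).symm⟩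
  unfold solve solve_alt countZeros
  have htn : ((m : Int)).toNat = m := by simp
  rw [htn]
  obtain ⟨k, hk, hf⟩ := stripOnes_eq (m + 1) m (by omega)
  rw [hk]
  have hfold := countZerosLoop_fold k 0 []
  simp only [Nat.cast_zero] at hfold
  rw [hfold]
  simp only [List.foldl_nil]
  have hcast : ((m : Int) + 1) = (((m + 1 : Nat)) : Int) := by push_cast; ring
  rw [hcast, fuscLoop_eq (m + 1) 1 0]
  simp only [pow_zero, one_mul]
  rw [hf]
  ring
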